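-- pv_equiv track=rewrite | github.com/redelefant-mr-e/prozess-optimizer | scripts/export_process.py | remove_duplicate_headings
-- ===== SOURCE A (Python) =====
-- def remove_duplicate_headings(md: str) -> str:
--     """Remove lines that duplicate the preceding ## or ### header."""
--     lines = md.split("\n")
--     result = []
--     i = 0
--     while i < len(lines):
--         line = lines[i]
--         stripped = line.strip()
--         if (stripped.startswith("## ") or stripped.startswith("### ")) and not stripped.startswith("#### "):
--             prefix_len = 4 if stripped.startswith("### ") else 3
--             title = stripped[prefix_len:].strip()
--             j = i + 1
--             while j < len(lines) and lines[j].strip() == "":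
--                 j += 1
--             next_line = lines[j].strip() if j < len(lines) else ""
--             is_duplicate = next_line == title
--             if not is_duplicate and ": " in title:
--                 is_duplicate = next_line == title.split(": ", 1)[1].strip()
--             if is_duplicate:
--                 result.append(line)
--                 i = j + 1
--                 continue
--         result.append(line)
--         i += 1
--     return "\n".join(result)
-- ===== SOURCE B (Python) =====
-- def remove_duplicate_headings(md: str) -> str:
--     """Remove lines that duplicate the preceding ## or ### header.
--
--     Single forward pass: keep a pending list of acceptable duplicate titles
--     and a buffer of blank lines, instead of an index with look-ahead.
--     """
--     out = []
--     pending = None  # candidate titles a following line may duplicate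
--     blanks = []  # blank lines seen while a pending title is armed
--     for line in md.split("\n"):
--         s = line.strip()
--         if pending is not None:
--             if s == "":
--                 blanks.append(line)
--                 continue
--             if s in pending:
--                 # duplicate of the header: drop buffered blanks and this line
--                 pending = None
--                 blanks = []
--                 continue
--             out.extend(blanks)
--             blanks = []
--             pending = None
--         out.append(line)
--         if (s.startswith("## ") or s.startswith("### ")) and not s.startswith("#### "):
--             title = s[4 if s.startswith("### ") else 3:].strip()
--             cand = [title]
--             if ": " in title:
--                 cand.append(title.split(": ", 1)[1].strip())
--             pending = cand
--     out.extend(blanks)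
--     return "\n".join(out)
-- ===== Notes on version B (the rewrite author's own statement) =====
-- stated objective: alternative
-- what changed: Replaces A's index-based outer loop with an inner look-ahead scan over following blank lines by a single forward pass that keeps a pending list of candidate titles and a buffer of blank lines, deciding duplicate-removal when the next non-blank line arrives and flushing the buffer otherwise or at end of input.
import Mathlib
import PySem

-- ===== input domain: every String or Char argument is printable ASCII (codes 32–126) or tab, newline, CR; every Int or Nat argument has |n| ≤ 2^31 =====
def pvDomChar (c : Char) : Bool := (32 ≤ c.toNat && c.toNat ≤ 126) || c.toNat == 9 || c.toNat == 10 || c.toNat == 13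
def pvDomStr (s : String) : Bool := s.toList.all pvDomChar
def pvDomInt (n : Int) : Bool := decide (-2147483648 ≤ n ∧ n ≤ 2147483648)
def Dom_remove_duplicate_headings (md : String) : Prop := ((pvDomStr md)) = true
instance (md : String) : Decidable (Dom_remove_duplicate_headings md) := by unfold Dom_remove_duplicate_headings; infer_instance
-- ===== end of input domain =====

-- B replaces A's index-with-look-ahead scan by a single forward pass keeping a pending
-- header title and a buffer of blank lines (objective: alternative decomposition, same cost).

-- ===== PORT A =====
-- A's inner `while j < len(lines) and lines[j].strip() == "": j += 1`, over the suffix from j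
def pvASkipBlanks (ls : List String) : List String :=
  match ls with
  | [] => []
  | l :: rest => if PySem.Str.strip l == "" then pvASkipBlanks rest else l :: rest

theorem pvASkipBlanks_length_le (ls : List String) : (pvASkipBlanks ls).length ≤ ls.length := by
  induction ls with
  | nil => simp [pvASkipBlanks]
  | cons l rest ih =>
    simp only [pvASkipBlanks]
    split
    · exact Nat.le_succ_of_le ih
    · exact Nat.le_refl _

-- A's outer `while i < len(lines)` loop, over the suffix of `lines` from i
def pvALoop (ls : List String) : List String :=
  match ls with
  | [] => []
  | line :: rest =>
    let stripped := PySem.Str.strip line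
    if (PySem.Str.startswith stripped "## " || PySem.Str.startswith stripped "### ") &&
        !PySem.Str.startswith stripped "#### " then
      let prefixLen : Int := if PySem.Str.startswith stripped "### " then 4 else 3
      let title := PySem.Str.strip (PySem.Str.slice stripped (some prefixLen) none)
      let after := pvASkipBlanks rest
      let nextLine := match after with
        | [] => ""
        | l :: _ => PySem.Str.strip l
      let isDup := nextLine == title
      -- `title.split(": ", 1)[1]` is only read under `": " in title`, where index 1 exists;
      -- pyGetD's default is never used there
      let isDup := if !isDup && PySem.Str.isIn ": " title then
          nextLine == PySem.Str.strip (PySem.List.pyGetD ((PySem.Str.splitMax? title ": " 1).getD []) 1 "")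
        else isDup
      if isDup then line :: pvALoop after.tail       -- i = j + 1
      else line :: pvALoop rest
    else line :: pvALoop rest
termination_by ls.length
decreasing_by
  · have h1 := pvASkipBlanks_length_le rest
    have h2 : (pvASkipBlanks rest).tail.length = (pvASkipBlanks rest).length - 1 := List.length_tail
    simp only [List.length_cons]
    omega
  · simp
  · simp

def remove_duplicate_headings (md : String) : String :=
  PySem.Str.join "\n" (pvALoop ((PySem.Str.split? md "\n").getD []))

-- ===== PORT B =====
-- B's re-arm step: the candidate titles the next non-blank line may duplicate
def pvBArm (s : String) : Option (List String) :=
  if (PySem.Str.startswith s "## " || PySem.Str.startswith s "### ") &&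
      !PySem.Str.startswith s "#### " then
    let title := PySem.Str.strip
      (PySem.Str.slice s (some (if PySem.Str.startswith s "### " then (4 : Int) else 3)) none)
    let cand := [title]
    -- `cand.append(title.split(": ", 1)[1].strip())`; index 1 exists under `": " in title`
    let cand := if PySem.Str.isIn ": " title then
        cand ++ [PySem.Str.strip (PySem.List.pyGetD ((PySem.Str.splitMax? title ": " 1).getD []) 1 "")]
      else cand
    some cand
  else none

-- the shared tail of B's loop body: emit the line and possibly re-arm
def pvBEmit (out : List String) (line s : String) :
    List String × Option (List String) × List String :=
  (out ++ [line], pvBArm s, [])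

-- one iteration of B's `for line in md.split("\n")`; state = (out, pending, blanks)
def pvBStep (st : List String × Option (List String) × List String) (line : String) :
    List String × Option (List String) × List String :=
  let s := PySem.Str.strip line
  match st with
  | (out, some cand, blanks) =>
    if s == "" then (out, some cand, blanks ++ [line])
    else if cand.contains s then (out, none, [])
    else pvBEmit (out ++ blanks) line s
  | (out, none, _blanks) => pvBEmit out line s

def remove_duplicate_headings_alt (md : String) : String :=
  let st := ((PySem.Str.split? md "\n").getD []).foldl pvBStep ([], none, [])
  PySem.Str.join "\n" (st.1 ++ st.2.2)

-- ===== PRECONDITION & SPEC =====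
def Spec_remove_duplicate_headings (md : String) (out : String) : Prop := out = remove_duplicate_headings_alt md
instance (md : String) (out : String) : Decidable (Spec_remove_duplicate_headings md out) := by unfold Spec_remove_duplicate_headings; infer_instance

-- ===== CLAIM (what is proved, stated in full; the proofs are below) =====
def Claim_equal_remove_duplicate_headings : Prop := ∀ (md : String), Dom_remove_duplicate_headings md → Spec_remove_duplicate_headings md (remove_duplicate_headings md)

-- ===== LEMMAS AND PROOFS =====

-- the "next non-blank line (or '')" that A's look-ahead reads
def pvNext (ls : List String) : String :=
  match pvASkipBlanks ls with
  | [] => ""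
  | l :: _ => PySem.Str.strip l

-- B's loop state collapsed to the output it produces if the input ends here
def pvFinish (st : List String × Option (List String) × List String) : List String :=
  st.1 ++ st.2.2

theorem pv_strip_all_ws {cs : List Char} (h : PySem.Chars.strip cs = []) :
    ∀ c ∈ cs, PySem.Chars.isspace c = true := by
  intro c hc
  simp only [PySem.Chars.strip, PySem.Chars.rstrip, PySem.Chars.lstrip,
    List.reverse_eq_nil_iff, List.dropWhile_eq_nil_iff, List.mem_reverse] at h
  rcases (List.mem_append.mp (by rw [List.takeWhile_append_dropWhile
      (p := PySem.Chars.isspace) (l := cs)]; exact hc)) with h1 | h2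
  · exact List.mem_takeWhile_imp h1
  · exact h _ h2

theorem pv_strip_getLast_not_ws {cs : List Char} (h : PySem.Chars.strip cs ≠ []) :
    PySem.Chars.isspace ((PySem.Chars.strip cs).getLast h) = false := by
  have h2 : List.dropWhile PySem.Chars.isspace (PySem.Chars.lstrip cs).reverse ≠ [] := by
    intro he
    apply h
    simp [PySem.Chars.strip, PySem.Chars.rstrip, he]
  have : (PySem.Chars.strip cs).getLast h
      = (List.dropWhile PySem.Chars.isspace (PySem.Chars.lstrip cs).reverse).head h2 := by
    simp only [PySem.Chars.strip, PySem.Chars.rstrip]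
    exact List.getLast_reverse _
  rw [this]
  exact List.head_dropWhile_not _ h2

-- "ends in a non-whitespace character"
def pvGoodEnd (cs : List Char) : Prop :=
  ∃ c, cs.getLast? = some c ∧ PySem.Chars.isspace c = false

theorem pvGoodEnd_ne_nil {cs : List Char} (h : pvGoodEnd cs) : cs ≠ [] := by
  obtain ⟨c, hc, -⟩ := h
  intro he; subst he; simp at hc

theorem pv_strip_ne_nil_of_goodEnd {cs : List Char} (h : pvGoodEnd cs) :
    PySem.Chars.strip cs ≠ [] := by
  obtain ⟨c, hc, hws⟩ := h
  intro he
  have hne := pvGoodEnd_ne_nil ⟨c, hc, hws⟩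
  have hmem : c ∈ cs := by
    have := List.getLast?_eq_some_getLast hne
    rw [this] at hc
    exact (Option.some_inj.mp hc) ▸ List.getLast_mem hne
  have := pv_strip_all_ws he c hmem
  simp [hws] at this

theorem pv_goodEnd_strip {cs : List Char} (h : PySem.Chars.strip cs ≠ []) :
    pvGoodEnd (PySem.Chars.strip cs) :=
  ⟨_, List.getLast?_eq_some_getLast h, pv_strip_getLast_not_ws h⟩

theorem pv_goodEnd_suffix {a b : List Char} (h : pvGoodEnd (a ++ b)) (hb : b ≠ []) :
    pvGoodEnd b := by
  obtain ⟨c, hc, hws⟩ := h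
  rw [List.getLast?_append_of_ne_nil a hb] at hc
  exact ⟨c, hc, hws⟩

-- if l ends well and a prefix p ends in whitespace, the rest after p is nonempty and ends well
theorem pv_goodEnd_drop {l p : List Char} (hg : pvGoodEnd l) (hp : p <+: l)
    (hpn : p ≠ []) (hpl : PySem.Chars.isspace (p.getLast hpn) = true) :
    l.drop p.length ≠ [] ∧ pvGoodEnd (l.drop p.length) := by
  obtain ⟨t, ht⟩ := hp
  have hdrop : l.drop p.length = t := by rw [← ht, List.drop_left]
  have htne : t ≠ [] := by
    intro he
    subst he
    rw [List.append_nil] at ht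
    subst ht
    obtain ⟨c, hc, hws⟩ := hg
    rw [List.getLast?_eq_some_getLast hpn] at hc
    rw [← Option.some_inj.mp hc] at hws
    simp [hpl] at hws
  subst ht
  exact ⟨by simpa [hdrop], by rw [hdrop]; exact pv_goodEnd_suffix hg htne⟩

theorem pv_go_zero (sep : List Char) :
    ∀ (fuel : Nat) (l cur : List Char) (acc : List (List Char)),
      PySem.Chars.splitOnMax.go sep fuel 0 l cur acc = ((cur.reverse ++ l) :: acc).reverse := by
  intro fuel l cur acc
  match fuel, l with
  | 0, l => simp [PySem.Chars.splitOnMax.go]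
  | f+1, [] => simp [PySem.Chars.splitOnMax.go]
  | f+1, c :: rest => simp [PySem.Chars.splitOnMax.go]

-- `go` with maxsplit 1 on a string containing sep: exactly one split at the first occurrence
theorem pv_go_one (sep : List Char) (hsep : sep ≠ []) :
    ∀ (fuel : Nat) (l cur : List Char), l.length < fuel → sep <:+: l →
      ∃ pre suf, pre ++ sep ++ suf = l ∧
        PySem.Chars.splitOnMax.go sep fuel 1 l cur [] = [cur.reverse ++ pre, suf] := by
  intro fuel
  induction fuel with
  | zero => intro l cur h; omega
  | succ f ih =>
    intro l cur hlen hinf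
    match l with
    | [] => exact absurd (List.eq_nil_of_infix_nil hinf) hsep
    | c :: rest =>
      by_cases hp : sep.isPrefixOf (c :: rest)
      · obtain ⟨t, ht⟩ := (List.isPrefixOf_iff_prefix.mp hp)
        refine ⟨[], List.drop sep.length (c :: rest), ?_, ?_⟩
        · simp only [List.nil_append]
          rw [← ht, List.drop_left]
        · simp only [PySem.Chars.splitOnMax.go, hp]
          rw [if_neg (by omega : ¬ (1:Nat) = 0)]
          simp only [if_true]
          rw [pv_go_zero]
          simp
      · have hinf' : sep <:+: rest := by
          rcases List.infix_cons_iff.mp hinf with h1 | h2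
          · exact absurd (List.isPrefixOf_iff_prefix.mpr h1) hp
          · exact h2
        obtain ⟨pre, suf, hps, hgo⟩ := ih rest (c :: cur) (by simp at hlen; omega) hinf'
        refine ⟨c :: pre, suf, by simp [← hps], ?_⟩
        simp only [PySem.Chars.splitOnMax.go]
        rw [if_neg (by omega : ¬ (1:Nat) = 0), if_neg (by simp [hp])]
        rw [hgo]
        simp

-- the part after the first ": " of a well-ended title strips to something nonempty
theorem pv_part2_ne {title : String} (hg : pvGoodEnd title.toList)
    (hin : PySem.Str.isIn ": " title = true) :
    PySem.Str.strip (PySem.List.pyGetD ((PySem.Str.splitMax? title ": " 1).getD []) 1 "") ≠ "" := by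
  have hinf : (": " : String).toList <:+: title.toList := by
    rw [PySem.Str.isIn_eq] at hin
    exact (PySem.Chars.isIn_iff_infix _ _).mp hin
  obtain ⟨pre, suf, hps, hgo⟩ := pv_go_one (": ").toList (by decide)
    (title.toList.length + 1) title.toList [] (by omega) hinf
  have hsplit : PySem.Str.splitMax? title ": " 1
      = some [String.ofList pre, String.ofList suf] := by
    simp only [PySem.Str.splitMax?, PySem.Chars.splitMax?, PySem.Chars.splitOnMax]
    rw [if_neg (by decide), if_neg (by omega)]
    have : (": " : String).toList = [':', ' '] := by decide
    rw [this] at hgo ⊢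
    simp only [Int.toNat_one, Option.map_some, Option.some.injEq]
    rw [hgo]
    simp
  have hsufne : suf ≠ [] := by
    intro he
    subst he
    rw [List.append_nil] at hps
    obtain ⟨c, hc, hws⟩ := hg
    rw [← hps, List.getLast?_append_of_ne_nil pre (by decide)] at hc
    have : c = ' ' := by
      have : (": " : String).toList = [':', ' '] := by decide
      rw [this] at hc
      simpa using hc.symm
    subst this
    simp [PySem.Chars.isspace] at hws
  have hgsuf : pvGoodEnd suf := by
    apply pv_goodEnd_suffix (a := pre ++ (": ").toList)
    · rw [hps]; exact hg
    · exact hsufne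
  have hres : PySem.List.pyGetD ((PySem.Str.splitMax? title ": " 1).getD []) 1 ""
      = String.ofList suf := by
    rw [hsplit]
    simp [PySem.List.pyGetD, PySem.List.pyGet?, PySem.List.pyIdx?]
  rw [hres]
  intro he
  have := congrArg String.toList he
  rw [PySem.Str.toList_strip, String.toList_ofList] at this
  exact pv_strip_ne_nil_of_goodEnd hgsuf (by simpa using this)

-- the title of a header line (a stripped string) is nonempty and ends well
theorem pv_title_facts {line : String}
    (hdr : ((PySem.Str.startswith (PySem.Str.strip line) "## "
        || PySem.Str.startswith (PySem.Str.strip line) "### ")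
        && !PySem.Str.startswith (PySem.Str.strip line) "#### ") = true) :
    PySem.Str.strip (PySem.Str.slice (PySem.Str.strip line)
        (some (if PySem.Str.startswith (PySem.Str.strip line) "### " then (4 : Int) else 3)) none) ≠ ""
    ∧ pvGoodEnd (PySem.Str.strip (PySem.Str.slice (PySem.Str.strip line)
        (some (if PySem.Str.startswith (PySem.Str.strip line) "### " then (4 : Int) else 3)) none)).toList := by
  simp only [Bool.and_eq_true, Bool.or_eq_true] at hdr
  set s := PySem.Str.strip line with hs
  have key : ∀ (p : List Char) (hpn : p ≠ []) (k : Int), p <+: s.toList →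
      PySem.Chars.isspace (p.getLast hpn) = true → k.toNat = p.length → 0 ≤ k →
      PySem.Str.strip (PySem.Str.slice s (some k) none) ≠ ""
      ∧ pvGoodEnd (PySem.Str.strip (PySem.Str.slice s (some k) none)).toList := by
    intro p hpn k hpre hlast hk hk0
    have hσ : s.toList = PySem.Chars.strip line.toList := PySem.Str.toList_strip line
    have hσne : s.toList ≠ [] := by
      intro he
      have h' := hpre
      rw [he] at h'
      exact hpn (List.prefix_nil.mp h')
    have hσgood : pvGoodEnd s.toList := by
      rw [hσ]
      exact pv_goodEnd_strip (by rw [← hσ]; exact hσne)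
    have hslice : (PySem.Str.slice s (some k) none).toList = s.toList.drop p.length := by
      rw [PySem.Str.toList_slice, PySem.Chars.slice_eq_listSlice, PySem.List.slice_from _ hk0, hk]
    obtain ⟨hdne, hdgood⟩ := pv_goodEnd_drop hσgood hpre hpn hlast
    have htl : (PySem.Str.strip (PySem.Str.slice s (some k) none)).toList
        = PySem.Chars.strip (s.toList.drop p.length) := by
      rw [PySem.Str.toList_strip, hslice]
    have hne := pv_strip_ne_nil_of_goodEnd hdgood
    constructor
    · intro he
      exact hne (by simpa [htl] using congrArg String.toList he)
    · rw [htl]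
      exact pv_goodEnd_strip hne
  by_cases h3 : PySem.Str.startswith s "### " = true
  · rw [if_pos h3]
    refine key "### ".toList (by decide) 4 ?_ (by decide) (by decide) (by decide)
    rw [PySem.Str.startswith_eq] at h3
    exact List.isPrefixOf_iff_prefix.mp h3
  · rw [if_neg h3]
    have h2 : PySem.Str.startswith s "## " = true := by
      rcases hdr.1 with h | h
      · exact h
      · exact absurd h h3
    refine key "## ".toList (by decide) 3 ?_ (by decide) (by decide) (by decide)
    rw [PySem.Str.startswith_eq] at h2
    exact List.isPrefixOf_iff_prefix.mp h2

-- `pvBArm` at a stripped line never produces the empty string as a candidate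
theorem pvBArm_no_empty {line : String} {cand : List String}
    (h : pvBArm (PySem.Str.strip line) = some cand) : cand.contains "" = false := by
  unfold pvBArm at h
  by_cases hdr : ((PySem.Str.startswith (PySem.Str.strip line) "## "
      || PySem.Str.startswith (PySem.Str.strip line) "### ")
      && !PySem.Str.startswith (PySem.Str.strip line) "#### ") = true
  · rw [if_pos hdr] at h
    dsimp only at h
    obtain ⟨htne, hgood⟩ := pv_title_facts hdr
    set title := PySem.Str.strip (PySem.Str.slice (PySem.Str.strip line)
      (some (if PySem.Str.startswith (PySem.Str.strip line) "### " then (4 : Int) else 3)) none)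
      with htitle
    by_cases hin : PySem.Str.isIn ": " title = true
    · rw [if_pos hin] at h
      have hp2 := pv_part2_ne hgood hin
      rw [← Option.some_inj.mp h]
      have hmem : ("" : String) ∉ [title,
          PySem.Str.strip (PySem.List.pyGetD ((PySem.Str.splitMax? title ": " 1).getD []) 1 "")] := by
        simp only [List.mem_cons, List.not_mem_nil, or_false]
        push Not
        exact ⟨fun he => htne he.symm, fun he => hp2 he.symm⟩
      simpa using hmem
    · rw [if_neg hin] at h
      rw [← Option.some_inj.mp h]
      have hmem : ("" : String) ∉ [title] := by
        simp only [List.mem_cons, List.not_mem_nil, or_false]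
        exact fun he => htne he.symm
      simpa using hmem
  · rw [if_neg hdr] at h
    cases h

theorem pvALoop_nil : pvALoop [] = [] := by simp [pvALoop]

theorem pvBArm_none_iff {s : String} :
    pvBArm s = none ↔ ((PySem.Str.startswith s "## " || PySem.Str.startswith s "### ")
      && !PySem.Str.startswith s "#### ") = false := by
  by_cases h : ((PySem.Str.startswith s "## " || PySem.Str.startswith s "### ")
      && !PySem.Str.startswith s "#### ") = true
  · unfold pvBArm
    rw [if_pos h]
    exact iff_of_false (by simp) (fun hc => Bool.noConfusion (h.symm.trans hc))
  · unfold pvBArm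
    rw [if_neg h]
    simp only [Bool.not_eq_true] at h
    exact iff_of_true rfl h

theorem pvBArm_empty : pvBArm "" = none := by
  rw [pvBArm_none_iff]
  decide

theorem pvALoop_cons_nonheader {line : String} {rest : List String}
    (h : pvBArm (PySem.Str.strip line) = none) :
    pvALoop (line :: rest) = line :: pvALoop rest := by
  rw [pvBArm_none_iff] at h
  simp only [pvALoop]
  rw [if_neg (by rw [h]; exact Bool.false_ne_true)]

theorem pvALoop_cons_header {line : String} {rest : List String} {cand : List String}
    (h : pvBArm (PySem.Str.strip line) = some cand) :
    pvALoop (line :: rest)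
      = line :: (if cand.contains (pvNext rest) then pvALoop (pvASkipBlanks rest).tail
                 else pvALoop rest) := by
  have hdr : ((PySem.Str.startswith (PySem.Str.strip line) "## "
      || PySem.Str.startswith (PySem.Str.strip line) "### ")
      && !PySem.Str.startswith (PySem.Str.strip line) "#### ") = true := by
    by_cases hh : ((PySem.Str.startswith (PySem.Str.strip line) "## "
        || PySem.Str.startswith (PySem.Str.strip line) "### ")
        && !PySem.Str.startswith (PySem.Str.strip line) "#### ") = true
    · exact hh
    · rw [pvBArm_none_iff.mpr (by simpa using hh)] at h
      cases h
  unfold pvBArm at h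
  rw [if_pos hdr] at h
  dsimp only at h
  simp only [pvALoop]
  rw [if_pos hdr]
  set title := PySem.Str.strip (PySem.Str.slice (PySem.Str.strip line)
    (some (if PySem.Str.startswith (PySem.Str.strip line) "### " then (4 : Int) else 3)) none)
    with htitle
  have hnext : (match pvASkipBlanks rest with
      | [] => ""
      | l :: _ => PySem.Str.strip l) = pvNext rest := rfl
  rw [hnext]
  set n := pvNext rest with hn
  have hdup : (if (!(n == title) && PySem.Str.isIn ": " title) = true then
        n == PySem.Str.strip (PySem.List.pyGetD ((PySem.Str.splitMax? title ": " 1).getD []) 1 "")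
      else (n == title)) = cand.contains n := by
    by_cases hnt : n = title
    · have hbt : (n == title) = true := by rw [hnt]; exact ReflBEq.rfl
      rw [hbt, Bool.not_true, Bool.false_and]
      rw [if_neg Bool.false_ne_true]
      symm
      by_cases hin : PySem.Str.isIn ": " title = true
      · rw [if_pos hin] at h
        rw [← Option.some_inj.mp h]
        simp only [List.contains_cons, hbt, Bool.true_or, List.cons_append]
      · rw [if_neg hin] at h
        rw [← Option.some_inj.mp h]
        simp only [List.contains_cons, hbt, Bool.true_or]
    · have hbt : (n == title) = false := beq_false_of_ne hnt
      rw [hbt, Bool.not_false, Bool.true_and]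
      by_cases hin : PySem.Str.isIn ": " title = true
      · rw [if_pos hin] at h ⊢
        rw [← Option.some_inj.mp h]
        simp only [List.singleton_append, List.contains_cons, List.contains_nil, hbt,
          Bool.false_or, Bool.or_false]
      · rw [if_neg hin] at h
        rw [if_neg hin]
        rw [← Option.some_inj.mp h]
        simp only [List.contains_cons, List.contains_nil, hbt, Bool.or_false]
  rw [hdup]
  by_cases hm : cand.contains n = true
  · rw [if_pos hm, if_pos hm]
  · rw [if_neg hm, if_neg hm]

-- one emitted line (B's shared tail) advances exactly like one step of A's outer loop
theorem pvEmitStep (line : String) (rest : List String)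
    (ih1 : ∀ out, pvFinish (rest.foldl pvBStep (out, none, [])) = out ++ pvALoop rest)
    (ih2 : ∀ out cand blanks, cand.contains "" = false →
      pvFinish (rest.foldl pvBStep (out, some cand, blanks))
        = out ++ (if cand.contains (pvNext rest) then pvALoop (pvASkipBlanks rest).tail
                  else blanks ++ pvALoop rest))
    (out : List String) :
    pvFinish (rest.foldl pvBStep (pvBEmit out line (PySem.Str.strip line)))
      = out ++ pvALoop (line :: rest) := by
  unfold pvBEmit
  cases harm : pvBArm (PySem.Str.strip line) with
  | none =>
    rw [ih1 (out ++ [line]), pvALoop_cons_nonheader harm]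
    simp
  | some cand =>
    rw [ih2 (out ++ [line]) cand [] (pvBArm_no_empty harm),
      pvALoop_cons_header harm]
    simp

-- the joint loop invariant: B's fold in either state tracks A's loop
theorem pvMain (ls : List String) :
    (∀ out, pvFinish (ls.foldl pvBStep (out, none, [])) = out ++ pvALoop ls) ∧
    (∀ out cand blanks, cand.contains "" = false →
      pvFinish (ls.foldl pvBStep (out, some cand, blanks))
        = out ++ (if cand.contains (pvNext ls) then pvALoop (pvASkipBlanks ls).tail
                  else blanks ++ pvALoop ls)) := by
  induction ls with
  | nil =>
    constructor
    · intro out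
      simp [pvFinish, pvALoop_nil]
    · intro out cand blanks hne
      simp only [List.foldl_nil]
      rw [show pvNext [] = "" from rfl, if_neg (by simpa using hne), pvALoop_nil]
      simp [pvFinish]
  | cons line rest ih =>
    obtain ⟨ih1, ih2⟩ := ih
    constructor
    · intro out
      rw [List.foldl_cons]
      exact pvEmitStep line rest ih1 ih2 out
    · intro out cand blanks hne
      rw [List.foldl_cons]
      by_cases hb : (PySem.Str.strip line == "") = true
      · have hb' : PySem.Str.strip line = "" := by simpa using hb
        have hstep : pvBStep (out, some cand, blanks) line = (out, some cand, blanks ++ [line]) := by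
          simp only [pvBStep]
          rw [if_pos hb]
        rw [hstep, ih2 out cand (blanks ++ [line]) hne]
        have hskip : pvASkipBlanks (line :: rest) = pvASkipBlanks rest := by
          simp [pvASkipBlanks, hb]
        have hnx : pvNext (line :: rest) = pvNext rest := by
          simp [pvNext, hskip]
        have hloop : pvALoop (line :: rest) = line :: pvALoop rest :=
          pvALoop_cons_nonheader (by rw [hb']; exact pvBArm_empty)
        rw [hskip, hnx, hloop]
        simp
      · have hskip : pvASkipBlanks (line :: rest) = line :: rest := by
          simp only [Bool.not_eq_true] at hb
          simp [pvASkipBlanks, hb]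
        have hnx : pvNext (line :: rest) = PySem.Str.strip line := by
          simp [pvNext, hskip]
        by_cases hcand : cand.contains (PySem.Str.strip line) = true
        · have hstep : pvBStep (out, some cand, blanks) line = (out, none, []) := by
            simp only [pvBStep]
            rw [if_neg hb, if_pos hcand]
          rw [hstep, ih1 out, hnx, hskip]
          rw [if_pos hcand]
          simp
        · have hstep : pvBStep (out, some cand, blanks) line
              = pvBEmit (out ++ blanks) line (PySem.Str.strip line) := by
            simp only [pvBStep]
            rw [if_neg hb, if_neg hcand]
          rw [hstep, pvEmitStep line rest ih1 ih2 (out ++ blanks), hnx]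
          rw [if_neg hcand]
          simp

-- ===== VERDICT (by name: the statement is the Claim_ definition above) =====
theorem remove_duplicate_headings_spec : Claim_equal_remove_duplicate_headings := by
  intro md _
  unfold Spec_remove_duplicate_headings remove_duplicate_headings remove_duplicate_headings_alt
  have hmain := (pvMain ((PySem.Str.split? md "\n").getD [])).1 []
  dsimp only
  rw [show (((PySem.Str.split? md "\n").getD []).foldl pvBStep ([], none, [])).1
        ++ (((PySem.Str.split? md "\n").getD []).foldl pvBStep ([], none, [])).2.2
      = pvFinish (((PySem.Str.split? md "\n").getD []).foldl pvBStep ([], none, [])) from rfl]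
  rw [hmain]
  simp
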